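-- pv_equiv track=rewrite | github.com/hijyunk/Algorithm | baekjoon/8958.py | calc
-- ===== SOURCE A (Python) =====
-- def calc(string):
--     result = 0
--     temp = 0
--     for s in string:
--         if s == 'O':
--             temp += 1
--             result += temp
--         else:
--             temp = 0
--     return result
-- ===== SOURCE B (Python) =====
-- def calc(string):
--     # Group the input into maximal runs of equal characters; each O-run of
--     # length n contributes the triangular number n*(n+1)//2 in closed form.
--     total = 0
--     rest = string
--     while rest:
--         c = rest[0]
--         i = 1
--         while i < len(rest) and rest[i] == c:
--             i += 1
--         if c == 'O':
--             total += i * (i + 1) // 2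
--         rest = rest[i:]
--     return total
-- ===== Notes on version B (the rewrite author's own statement) =====
-- stated objective: alternative
-- what changed: Replaces A's per-character running accumulator (temp/result) with grouping the string into maximal runs of equal characters and adding the closed-form triangular number n*(n+1)//2 per O-run.
import Mathlib
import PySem

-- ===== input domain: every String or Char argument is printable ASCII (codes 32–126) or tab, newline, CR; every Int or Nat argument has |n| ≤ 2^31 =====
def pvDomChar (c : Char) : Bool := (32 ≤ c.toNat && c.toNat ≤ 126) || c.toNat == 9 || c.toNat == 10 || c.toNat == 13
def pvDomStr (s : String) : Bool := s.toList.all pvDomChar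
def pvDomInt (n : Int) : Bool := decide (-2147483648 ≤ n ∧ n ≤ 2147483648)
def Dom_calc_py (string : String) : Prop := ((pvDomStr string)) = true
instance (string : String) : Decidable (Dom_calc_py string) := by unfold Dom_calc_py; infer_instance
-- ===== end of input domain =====

-- B groups the string into maximal runs of equal characters and adds the
-- closed-form triangular number n*(n+1)//2 per O-run, instead of A's
-- per-character running accumulator (objective: alternative decomposition).

-- ===== PORT A =====
-- state = (result, temp); the for-loop is a foldl over the characters
def calc_py (string : String) : Int :=
  (string.toList.foldl
    (fun (st : Int × Int) s =>
      if s == 'O' then (st.1 + (st.2 + 1), st.2 + 1) else (st.1, 0))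
    (0, 0)).1

-- ===== PORT B =====
-- the outer while-loop over 'rest'; the inner while-loop counts the maximal
-- prefix of characters equal to rest[0] (i = 1 + length of matching prefix of
-- the tail, i.e. takeWhile), and rest[i:] is dropWhile of the tail
def calcAltGo (l : List Char) : Int :=
  match l with
  | [] => 0
  | c :: cs =>
      let i : Int := 1 + (cs.takeWhile (· == c)).length
      (if c == 'O' then PySem.Int.floordiv (i * (i + 1)) 2 else 0)
        + calcAltGo (cs.dropWhile (· == c))
termination_by l.length
decreasing_by
  simp only [List.length_cons]
  exact Nat.lt_succ_of_le (cs.dropWhile_sublist (· == c)).length_le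

def calc_py_alt (string : String) : Int := calcAltGo string.toList

-- ===== PRECONDITION & SPEC =====
def Spec_calc_py (string : String) (out : Int) : Prop := out = calc_py_alt string
instance (string : String) (out : Int) : Decidable (Spec_calc_py string out) := by unfold Spec_calc_py; infer_instance

-- ===== CLAIM (what is proved, stated in full; the proofs are below) =====
def Claim_equal_calc_py : Prop := ∀ (string : String), Dom_calc_py string → Spec_calc_py string (calc_py string)

-- ===== LEMMAS AND PROOFS =====

-- contribution of the remaining characters given current streak value t
def gA (t : Int) : List Char → Int
  | [] => 0
  | c :: cs => if c == 'O' then (t + 1) + gA (t + 1) cs else gA 0 cs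

-- sum (t+1) + (t+2) + … + (t+n)
def sRun (n : Nat) (t : Int) : Int :=
  match n with
  | 0 => 0
  | n + 1 => (t + 1) + sRun n (t + 1)

theorem foldA_fst (l : List Char) (r t : Int) :
    (l.foldl (fun (st : Int × Int) s =>
        if s == 'O' then (st.1 + (st.2 + 1), st.2 + 1) else (st.1, 0)) (r, t)).1
      = r + gA t l := by
  induction l generalizing r t with
  | nil => simp [gA]
  | cons c cs ih =>
      by_cases h : (c == 'O') = true
      · simp only [List.foldl_cons, h, if_true, gA]
        rw [ih]; ring
      · simp only [List.foldl_cons, gA, if_neg h]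
        exact ih r 0

theorem gA_head_ne (l : List Char) (t : Int) (h : ∀ x, l.head? = some x → x ≠ 'O') :
    gA t l = gA 0 l := by
  cases l with
  | nil => rfl
  | cons c cs =>
      have hc : ¬ (c == 'O') = true := by
        simpa using h c rfl
      simp [gA, hc]

theorem gA_run (run : List Char) (t : Int) (rest : List Char)
    (h : ∀ x ∈ run, x = 'O') :
    gA t (run ++ rest) = sRun run.length t + gA (t + run.length) rest := by
  induction run generalizing t with
  | nil => simp [sRun]
  | cons c cs ih =>
      have hc : c = 'O' := h c (by simp)
      have hcs : ∀ x ∈ cs, x = 'O' := fun x hx => h x (by simp [hx])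
      simp only [List.cons_append, gA, hc, beq_self_eq_true, if_true,
        List.length_cons, sRun, ih (t + 1) hcs]
      push_cast
      ring_nf

theorem gA_skip (pre : List Char) (rest : List Char)
    (h : ∀ x ∈ pre, x ≠ 'O') :
    gA 0 (pre ++ rest) = gA 0 rest := by
  induction pre with
  | nil => rfl
  | cons c cs ih =>
      have hc : ¬ (c == 'O') = true := by simpa using h c (by simp)
      simpa [gA, hc] using ih (fun x hx => h x (by simp [hx]))

theorem sRun_closed (n : Nat) (t : Int) :
    sRun n t = n * t + PySem.Int.floordiv ((n : Int) * ((n : Int) + 1)) 2 := by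
  induction n generalizing t with
  | zero => simp [sRun, PySem.Int.floordiv]
  | succ n ih =>
      have h2 : (0 : Int) < 2 := by omega
      simp only [PySem.Int.floordiv_eq_ediv_of_pos h2] at ih ⊢
      have e1 : ((n : Int) + 1) * (((n : Int) + 1) + 1)
          = (n : Int) * ((n : Int) + 1) + 2 * ((n : Int) + 1) := by ring
      have e2 : ∀ m k : Int, (m + 2 * k) / 2 = m / 2 + k := by
        intro m k; omega
      simp only [sRun, ih]
      push_cast
      rw [e1, e2]
      ring

theorem head?_dropWhile_ne (p : Char → Bool) (l : List Char) :
    ∀ x, (l.dropWhile p).head? = some x → p x = false := by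
  induction l with
  | nil => intro x hx; simp at hx
  | cons c cs ih =>
      intro x hx
      by_cases h : p c = true
      · exact ih x (by simpa [List.dropWhile, h] using hx)
      · simp [List.dropWhile, Bool.eq_false_iff.mpr h] at hx
        subst hx; exact Bool.eq_false_iff.mpr h

theorem gA_eq_altGo_aux (n : Nat) : ∀ l : List Char, l.length ≤ n → gA 0 l = calcAltGo l := by
  induction n with
  | zero =>
      intro l hl
      have : l = [] := List.eq_nil_of_length_eq_zero (Nat.le_zero.mp hl)
      subst this
      simp [gA, calcAltGo]
  | succ n ih =>
      intro l hl
      match l with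
      | [] => simp [gA, calcAltGo]
      | c :: cs =>
        have hcs : cs.length ≤ n := by simpa using hl
        have hdroplen : (cs.dropWhile (· == c)).length ≤ n :=
          le_trans (cs.dropWhile_sublist (· == c)).length_le hcs
        have ihd := ih (cs.dropWhile (· == c)) hdroplen
        have hsplit : cs.takeWhile (· == c) ++ cs.dropWhile (· == c) = cs :=
          cs.takeWhile_append_dropWhile
        by_cases hc : c = 'O'
        · subst hc
          have hrun : ∀ x ∈ cs.takeWhile (· == 'O'), x = 'O' := by
            intro x hx
            simpa using List.mem_takeWhile_imp hx
          have hdrop : ∀ x, (cs.dropWhile (· == 'O')).head? = some x → x ≠ 'O' := by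
            intro x hx
            have := head?_dropWhile_ne (· == 'O') cs x hx
            simpa using this
          calc gA 0 ('O' :: cs)
              = 1 + gA 1 (cs.takeWhile (· == 'O') ++ cs.dropWhile (· == 'O')) := by
                rw [hsplit]; simp [gA]
            _ = 1 + (sRun (cs.takeWhile (· == 'O')).length 1
                  + gA (1 + (cs.takeWhile (· == 'O')).length) (cs.dropWhile (· == 'O'))) := by
                rw [gA_run _ 1 _ hrun]
            _ = calcAltGo ('O' :: cs) := by
                rw [gA_head_ne _ _ hdrop, ihd]
                simp only [calcAltGo, beq_self_eq_true, if_true]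
                rw [sRun_closed]
                rw [PySem.Int.floordiv_eq_ediv_of_pos (by omega : (0:Int) < 2),
                  PySem.Int.floordiv_eq_ediv_of_pos (by omega : (0:Int) < 2)]
                have e1 : (1 + ((cs.takeWhile (· == 'O')).length : Int))
                    * ((1 + ((cs.takeWhile (· == 'O')).length : Int)) + 1)
                    = ((cs.takeWhile (· == 'O')).length : Int)
                      * (((cs.takeWhile (· == 'O')).length : Int) + 1)
                      + 2 * (((cs.takeWhile (· == 'O')).length : Int) + 1) := by ring
                have e2 : ∀ m k : Int, (m + 2 * k) / 2 = m / 2 + k := by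
                  intro m k; omega
                rw [e1, e2]
                ring
        · have hpre : ∀ x ∈ cs.takeWhile (· == c), x ≠ 'O' := by
            intro x hx hxO
            have hxc : x = c := by simpa using List.mem_takeWhile_imp hx
            exact hc (hxc ▸ hxO)
          have hcb : ¬ (c == 'O') = true := by simpa using hc
          calc gA 0 (c :: cs)
              = gA 0 (cs.takeWhile (· == c) ++ cs.dropWhile (· == c)) := by
                rw [hsplit]; simp [gA, hcb]
            _ = gA 0 (cs.dropWhile (· == c)) := gA_skip _ _ hpre
            _ = calcAltGo (c :: cs) := by
                rw [ihd]; simp [calcAltGo, hcb]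

theorem gA_eq_altGo (l : List Char) : gA 0 l = calcAltGo l :=
  gA_eq_altGo_aux l.length l (le_refl _)

-- ===== VERDICT (by name: the statement is the Claim_ definition above) =====
theorem calc_py_spec : Claim_equal_calc_py := by
  intro s _
  unfold Spec_calc_py calc_py calc_py_alt
  rw [foldA_fst, ← gA_eq_altGo]
  ring
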